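-- pv_equiv track=rewrite | github.com/pypi-data/pypi-mirror-392 | packages/gridforge/gridforge-3.0.0.tar.gz/gridforge-3.0.0/gridforge/data_validator.py | ensure_consistent_columns
-- ===== SOURCE A (Python) =====
-- def ensure_consistent_columns(rows):
--     """
--     Stellt sicher, dass alle Zeilen die gleiche Anzahl von Spalten haben.
--
--     Args:
--         rows: Liste von Zeilen
--
--     Returns:
--         (is_consistent, max_columns) - Tuple mit Konsistenzstatus und max. Spaltenanzahl
--     """
--     if not rows:
--         return True, 0
--
--     lengths = [len(row) for row in rows]
--     max_length = max(lengths)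
--     min_length = min(lengths)
--
--     is_consistent = max_length == min_length
--     return is_consistent, max_length
-- ===== SOURCE B (Python) =====
-- def ensure_consistent_columns(rows):
--     if not rows:
--         return True, 0
--     ref = len(rows[0])
--     is_consistent = True
--     max_length = ref
--     for row in rows[1:]:
--         n = len(row)
--         if n != ref:
--             is_consistent = False
--         if n > max_length:
--             max_length = n
--     return is_consistent, max_length
-- ===== Notes on version B (the rewrite author's own statement) =====
-- stated objective: simpler
-- what changed: Single fused pass comparing each row's length to the first row's (a flag plus a running max) instead of materialising a lengths list and reducing it twice with max and min.
import Mathlib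
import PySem

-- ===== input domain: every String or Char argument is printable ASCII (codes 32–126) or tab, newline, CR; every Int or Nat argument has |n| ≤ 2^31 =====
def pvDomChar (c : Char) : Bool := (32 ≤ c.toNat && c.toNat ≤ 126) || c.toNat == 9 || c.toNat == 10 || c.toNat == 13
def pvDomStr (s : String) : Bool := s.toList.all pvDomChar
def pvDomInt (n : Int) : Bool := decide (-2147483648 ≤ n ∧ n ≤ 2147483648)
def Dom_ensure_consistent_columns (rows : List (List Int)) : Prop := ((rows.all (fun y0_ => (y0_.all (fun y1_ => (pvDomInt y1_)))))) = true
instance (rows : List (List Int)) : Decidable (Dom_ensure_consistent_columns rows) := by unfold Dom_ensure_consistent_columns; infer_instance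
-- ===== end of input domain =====

-- B replaces A's lengths list and its two separate max/min reductions by one fused pass
-- (compare-to-first flag plus a running maximum); objective: simpler, same O(n) cost.

-- ===== PORT A =====
-- max(lengths)/min(lengths) on the nonempty list are the running max/min loops
-- (PySem.List.max?_id_cons / min?_id_cons).
def ensure_consistent_columns (rows : List (List Int)) : Bool × Int :=
  match rows with
  | [] => (true, 0)
  | r :: rs =>
    let lengths : List Int := rs.map (fun row => (row.length : Int))
    let max_length : Int := lengths.foldl max (r.length : Int)
    let min_length : Int := lengths.foldl min (r.length : Int)
    (decide (max_length = min_length), max_length)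

-- ===== PORT B =====
def ensure_consistent_columns_alt (rows : List (List Int)) : Bool × Int :=
  match rows with
  | [] => (true, 0)
  | r :: rs =>
    let ref : Int := (r.length : Int)
    rs.foldl
      (fun (st : Bool × Int) row =>
        let n : Int := (row.length : Int)
        (if n ≠ ref then false else st.1, if n > st.2 then n else st.2))
      (true, ref)

-- ===== PRECONDITION & SPEC =====
def Spec_ensure_consistent_columns (rows : List (List Int)) (out : Bool × Int) : Prop := out = ensure_consistent_columns_alt rows
instance (rows : List (List Int)) (out : Bool × Int) : Decidable (Spec_ensure_consistent_columns rows out) := by unfold Spec_ensure_consistent_columns; infer_instance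

-- ===== CLAIM (what is proved, stated in full; the proofs are below) =====
def Claim_equal_ensure_consistent_columns : Prop := ∀ (rows : List (List Int)), Dom_ensure_consistent_columns rows → Spec_ensure_consistent_columns rows (ensure_consistent_columns rows)

-- ===== LEMMAS AND PROOFS =====

-- B's fold, second component: it is the running max of the lengths.
theorem alt_fold_snd (rs : List (List Int)) (ref : Int) (b : Bool) (m : Int) :
    (rs.foldl
      (fun (st : Bool × Int) row =>
        (if (row.length : Int) ≠ ref then false else st.1,
         if (row.length : Int) > st.2 then (row.length : Int) else st.2))
      (b, m)).2 = (rs.map (fun row => (row.length : Int))).foldl max m := by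
  induction rs generalizing b m with
  | nil => rfl
  | cons a t ih =>
    simp only [List.foldl_cons, List.map_cons, ih]
    congr 1
    rw [max_def]
    split_ifs <;> omega

-- B's fold, first component: the flag records "every length equals ref".
theorem alt_fold_fst (rs : List (List Int)) (ref : Int) (b : Bool) (m : Int) :
    (rs.foldl
      (fun (st : Bool × Int) row =>
        (if (row.length : Int) ≠ ref then false else st.1,
         if (row.length : Int) > st.2 then (row.length : Int) else st.2))
      (b, m)).1 = (b && rs.all (fun row => (row.length : Int) = ref)) := by
  induction rs generalizing b m with
  | nil => simp
  | cons a t ih =>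
    simp only [List.foldl_cons, List.all_cons, ih]
    by_cases h : (a.length : Int) = ref <;> simp [h]

-- the running max equals the running min iff every element equals the seed.
theorem foldl_max_eq_min_iff (ls : List Int) (r : Int) :
    (ls.foldl max r = ls.foldl min r) ↔ (ls.all (fun x => x = r) = true) := by
  constructor
  · intro h
    rw [List.all_eq_true]
    intro x hx
    have h1 := (PySem.List.le_foldl_max ls r).1
    have h2 := (PySem.List.le_foldl_max ls r).2 x hx
    have h3 := (PySem.List.foldl_min_le ls r).1
    have h4 := (PySem.List.foldl_min_le ls r).2 x hx
    simp only [decide_eq_true_eq]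
    omega
  · intro h
    rw [List.all_eq_true] at h
    induction ls with
    | nil => rfl
    | cons a t ih =>
      have ha : a = r := by simpa using h a (by simp)
      subst ha
      simp only [List.foldl_cons, max_self, min_self]
      exact ih (fun x hx => h x (List.mem_cons_of_mem _ hx))

-- ===== VERDICT (by name: the statement is the Claim_ definition above) =====
theorem ensure_consistent_columns_spec : Claim_equal_ensure_consistent_columns := by
  intro rows _
  unfold Spec_ensure_consistent_columns ensure_consistent_columns ensure_consistent_columns_alt
  match rows with
  | [] => rfl
  | r :: rs =>
    simp only
    rw [Prod.ext_iff, alt_fold_fst, alt_fold_snd, Bool.true_and]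
    refine ⟨?_, rfl⟩
    by_cases h : (rs.map (fun row => (row.length : Int))).foldl max (r.length : Int)
        = (rs.map (fun row => (row.length : Int))).foldl min (r.length : Int)
    · rw [decide_eq_true h]
      have := (foldl_max_eq_min_iff _ _).mp h
      rw [List.all_map] at this
      exact this.symm
    · rw [decide_eq_false h]
      have : ¬ (rs.all (fun row => (row.length : Int) = (r.length : Int)) = true) := by
        intro hc
        exact h ((foldl_max_eq_min_iff _ _).mpr (by rwa [List.all_map]))
      exact (Bool.eq_false_iff.mpr (fun hc => this hc)).symm
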